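-- pv_equiv track=rewrite | github.com/MartinYan623/Lint-Code | Algorithm/Naive/25Print X.py | printX
-- ===== SOURCE A (Python) =====
-- import copy
--
-- def printX(n):
--     # write your code here.
--     result = []
--     subresult = []
--     if n == 1:
--         return ['X']
--     for i in range(int(n / 2)):
--         subresult.append(' ' * i + 'X' + ' ' * (n - 2 * i - 2) + 'X' + ' ' * i)
--
--     result = copy.deepcopy(subresult)
--
--     if n % 2 != 0:
--         result.append(' ' * int((n - 1) / 2) + 'X' + ' ' * int((n - 1) / 2))
--
--     for j in range(len(subresult) - 1, -1, -1):
--         result.append(subresult[j])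
--
--     return result
-- ===== SOURCE B (Python) =====
-- def printX(n):
--     # write your code here.
--     out = []
--     for i in range(n):
--         row = [' '] * n
--         row[i] = 'X'
--         row[n - 1 - i] = 'X'
--         out.append(''.join(row))
--     return out
-- ===== Notes on version B (the rewrite author's own statement) =====
-- stated objective: simpler
-- what changed: B computes every row directly in one loop over range(n) (a blank row buffer with 'X' stored at columns i and n-1-i, coinciding at the centre) instead of building the top half row-by-row, deep-copying it, appending a special middle row and mirroring the half with a reversed index loop.
-- intended difference: For negative odd n A returns a singleton list holding one 'X' (its middle-row append fires on odd n while every loop body is skipped); B returns the empty list, the intended empty pattern for a non-positive size. — e.g. on printX(-1): A returns ["X"], B returns []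
import Mathlib
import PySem

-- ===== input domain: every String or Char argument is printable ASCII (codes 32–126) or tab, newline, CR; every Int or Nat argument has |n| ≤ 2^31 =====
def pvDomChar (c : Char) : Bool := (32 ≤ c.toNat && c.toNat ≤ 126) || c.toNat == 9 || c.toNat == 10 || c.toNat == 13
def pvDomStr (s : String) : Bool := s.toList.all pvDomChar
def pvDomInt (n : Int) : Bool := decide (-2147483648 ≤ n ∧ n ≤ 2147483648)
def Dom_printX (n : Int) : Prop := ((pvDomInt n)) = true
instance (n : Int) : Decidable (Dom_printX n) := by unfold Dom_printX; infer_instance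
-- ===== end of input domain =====

-- B builds every row directly (X at columns i and n-1-i) in one comprehension instead of
-- A's half-build + deepcopy + middle-row append + mirrored index loop; same cost, simpler.

-- ===== PORT A =====
def printX (n : Int) : List String :=
  if n = 1 then ["X"]
  else
    -- for i in range(int(n / 2)): subresult.append(' '*i + 'X' + ' '*(n-2*i-2) + 'X' + ' '*i)
    let subresult : List String :=
      (PySem.List.pyRange 0 (PySem.Int.truncdiv n 2) 1).foldl
        (fun acc i => acc ++ [String.ofList (PySem.List.pyRepeat [' '] i ++ ['X'] ++
            PySem.List.pyRepeat [' '] (n - 2*i - 2) ++ ['X'] ++ PySem.List.pyRepeat [' '] i)]) []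
    -- result = copy.deepcopy(subresult)  (deep copy of a list of strings = the same value)
    let result : List String := subresult
    -- if n % 2 != 0: result.append(' '*int((n-1)/2) + 'X' + ' '*int((n-1)/2))
    let result : List String :=
      if PySem.Int.mod n 2 ≠ 0 then
        result ++ [String.ofList (PySem.List.pyRepeat [' '] (PySem.Int.truncdiv (n-1) 2) ++ ['X'] ++
            PySem.List.pyRepeat [' '] (PySem.Int.truncdiv (n-1) 2))]
      else result
    -- for j in range(len(subresult)-1, -1, -1): result.append(subresult[j])
    (PySem.List.pyRange ((subresult.length : Int) - 1) (-1) (-1)).foldl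
      (fun acc j => acc ++ [PySem.List.pyGetD subresult j ""]) result

-- ===== PORT B =====
def printX_alt (n : Int) : List String :=
  (PySem.List.pyRange 0 n 1).foldl
    (fun out i =>
      let row := PySem.List.pyRepeat [' '] n
      let row := PySem.List.pySetD row i 'X'
      let row := PySem.List.pySetD row (n - 1 - i) 'X'
      out ++ [String.ofList row]) []

-- ===== PRECONDITION & SPEC =====
-- For negative odd n A returns a singleton list holding one 'X' (its middle-row append fires
-- on odd n while every loop body is skipped); B returns the empty list, the intended empty
-- pattern for a non-positive size.
def D_printX (n : Int) : Prop := n < 0 ∧ n % 2 = 1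
instance (n : Int) : Decidable (D_printX n) := by unfold D_printX; infer_instance

def Spec_printX (n : Int) (out : List String) : Prop := ¬ D_printX n → out = printX_alt n
instance (n : Int) (out : List String) : Decidable (Spec_printX n out) := by unfold Spec_printX; infer_instance

def pvDiffWitness_printX : Int := (-1)
def pvDiffWitnessOut_printX : (List String) × (List String) := (["X"], [])

-- ===== CLAIM (what is proved, stated in full; the proofs are below) =====
def Claim_unchanged_printX : Prop := ∀ (n : Int), Dom_printX n → Spec_printX n (printX n)
def Claim_changed_printX : Prop := Dom_printX (pvDiffWitness_printX) ∧ D_printX (pvDiffWitness_printX) ∧ printX (pvDiffWitness_printX) = pvDiffWitnessOut_printX.1 ∧ printX_alt (pvDiffWitness_printX) = pvDiffWitnessOut_printX.2 ∧ pvDiffWitnessOut_printX.1 ≠ pvDiffWitnessOut_printX.2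
def Claim_exact_printX : Prop := ∀ (n : Int), Dom_printX n → D_printX n → printX n ≠ printX_alt n

-- ===== LEMMAS AND PROOFS =====

-- the character B's row i carries at column j, and the row as B computes it
def bChar (n i j : Int) : Char := if j == i || j == n - 1 - i then 'X' else ' '
def bRow (n i : Int) : List Char := (PySem.List.pyRange 0 n 1).map (bChar n i)
def bRowImp (n i : Int) : List Char :=
  PySem.List.pySetD (PySem.List.pySetD (PySem.List.pyRepeat [' '] n) i 'X') (n - 1 - i) 'X'

theorem alt_eq (n : Int) :
    printX_alt n = (PySem.List.pyRange 0 n 1).map (fun i => String.ofList (bRowImp n i)) := by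
  unfold printX_alt
  rw [PySem.List.foldl_append_singleton_eq_map]
  simp [bRowImp]

-- the two in-place stores produce exactly the column-wise row, for any row index in range
theorem rowImp_eq (n i : Int) (h0 : 0 ≤ i) (h : i < n) : bRowImp n i = bRow n i := by
  obtain ⟨a, rfl⟩ : ∃ a : Nat, i = (a : Int) := ⟨i.toNat, by omega⟩
  unfold bRowImp bRow
  rw [PySem.List.pyRepeat_singleton,
      show n - 1 - (a : Int) = (((n - 1 - a).toNat : Nat) : Int) by omega,
      PySem.List.pySetD_natCast, PySem.List.pySetD_natCast]
  apply List.ext_getElem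
  · simp [PySem.List.length_pyRange_one]
  · intro t h1 h2
    simp only [List.length_set, List.length_replicate] at h1
    simp only [List.length_map, PySem.List.length_pyRange_one] at h2
    simp only [bChar, List.getElem_set, List.getElem_replicate, List.getElem_map,
      PySem.List.getElem_pyRange_one, zero_add, Bool.or_eq_true, beq_iff_eq]
    split_ifs <;> first | rfl | omega

theorem tdiv_two (n : Int) (h : 0 ≤ n) : PySem.Int.truncdiv n 2 = n / 2 := by
  show Int.tdiv n 2 = n / 2
  rw [Int.tdiv_eq_ediv]
  simp [Or.inl h]

theorem tdiv_two_nonpos (n : Int) (h : n ≤ 0) : PySem.Int.truncdiv n 2 ≤ 0 := by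
  show Int.tdiv n 2 ≤ 0
  rw [Int.tdiv_eq_ediv, show (2:Int).sign = 1 from rfl]
  split_ifs <;> omega

theorem mod_two (n : Int) : PySem.Int.mod n 2 = n % 2 :=
  PySem.Int.mod_eq_emod_of_pos (by norm_num)

-- a block of columns that contains neither X-position is all spaces
theorem seg_const (n i a b : Int)
    (h : ∀ j, a ≤ j → j < b → ¬(j = i ∨ j = n - 1 - i)) :
    (PySem.List.pyRange a b 1).map (bChar n i) = List.replicate (b - a).toNat ' ' := by
  rw [List.eq_replicate_iff]
  refine ⟨by simp [PySem.List.length_pyRange_one], ?_⟩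
  intro c hc
  rw [List.mem_map] at hc
  obtain ⟨j, hj, rfl⟩ := hc
  rw [PySem.List.mem_pyRange_one] at hj
  have := h j hj.1 hj.2
  simp only [bChar]
  rw [if_neg]
  simpa using this

theorem bChar_self (n i : Int) : bChar n i i = 'X' := by simp [bChar]

theorem bChar_mirror (n i : Int) : bChar n i (n - 1 - i) = 'X' := by simp [bChar]

-- rows strictly in the top half
theorem row_eq_of_lt (n i : Int) (h0 : 0 ≤ i) (h : 2*i + 2 ≤ n) :
    bRow n i = List.replicate i.toNat ' ' ++ ['X'] ++
      List.replicate (n - 2*i - 2).toNat ' ' ++ ['X'] ++ List.replicate i.toNat ' ' := by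
  have e1 : PySem.List.pyRange 0 n 1 =
      PySem.List.pyRange 0 i 1 ++ PySem.List.pyRange i (i+1) 1 ++
      PySem.List.pyRange (i+1) (n-1-i) 1 ++ PySem.List.pyRange (n-1-i) (n-1-i+1) 1 ++
      PySem.List.pyRange (n-1-i+1) n 1 := by
    rw [PySem.List.pyRange_one_append 0 i n (by omega) (by omega),
        PySem.List.pyRange_one_append i (i+1) n (by omega) (by omega),
        PySem.List.pyRange_one_append (i+1) (n-1-i) n (by omega) (by omega),
        PySem.List.pyRange_one_append (n-1-i) (n-1-i+1) n (by omega) (by omega)]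
    simp [List.append_assoc]
  unfold bRow
  rw [e1]
  simp only [List.map_append, PySem.List.pyRange_one_singleton, List.map_cons, List.map_nil]
  rw [seg_const n i 0 i (by omega), seg_const n i (i+1) (n-1-i) (by omega),
      seg_const n i (n-1-i+1) n (by omega), bChar_self, bChar_mirror]
  have : (n - 1 - i - (i + 1)) = n - 2*i - 2 := by ring
  rw [this]
  have : (n - (n - 1 - i + 1)).toNat = i.toNat := by omega
  rw [this]
  have : (i - 0) = i := by ring
  rw [this]

-- the centre row of an odd pattern
theorem row_center (n : Int) (h0 : 0 ≤ n) (hodd : n % 2 = 1) :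
    bRow n (n/2) = List.replicate (n/2).toNat ' ' ++ ['X'] ++ List.replicate (n/2).toNat ' ' := by
  have hmid : n - 1 - n/2 = n/2 := by omega
  have e1 : PySem.List.pyRange 0 n 1 =
      PySem.List.pyRange 0 (n/2) 1 ++ PySem.List.pyRange (n/2) (n/2+1) 1 ++
      PySem.List.pyRange (n/2+1) n 1 := by
    rw [PySem.List.pyRange_one_append 0 (n/2) n (by omega) (by omega),
        PySem.List.pyRange_one_append (n/2) (n/2+1) n (by omega) (by omega)]
    simp [List.append_assoc]
  unfold bRow
  rw [e1]
  simp only [List.map_append, PySem.List.pyRange_one_singleton, List.map_cons, List.map_nil]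
  rw [seg_const n (n/2) 0 (n/2) (by omega), seg_const n (n/2) (n/2+1) n (by omega), bChar_self]
  have : (n - (n/2+1)).toNat = (n/2).toNat := by omega
  rw [this]
  have : (n/2 - 0) = n/2 := by ring
  rw [this]

-- rows are symmetric: row n-1-i equals row i
theorem bRow_symm (n i : Int) : bRow n (n - 1 - i) = bRow n i := by
  unfold bRow
  apply List.map_congr_left
  intro j _
  simp only [bChar]
  have : n - 1 - (n - 1 - i) = i := by ring
  rw [this, Bool.or_comm]

-- the second half of the index range lists the mirrored first-half indices, reversed
theorem second_half (n k : Int) :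
    PySem.List.pyRange (n-k) n 1 = ((PySem.List.pyRange 0 k 1).map (fun i => n - 1 - i)).reverse := by
  apply List.ext_getElem
  · simp [PySem.List.length_pyRange_one]
  · intro t h1 h2
    simp only [List.length_reverse, List.length_map, PySem.List.length_pyRange_one] at h1 h2
    rw [PySem.List.getElem_pyRange_one, List.getElem_reverse, List.getElem_map,
        PySem.List.getElem_pyRange_one]
    simp only [List.length_map, PySem.List.length_pyRange_one]
    omega

-- A's first loop, as a map
theorem sub_eq (n : Int) :
    ((PySem.List.pyRange 0 (PySem.Int.truncdiv n 2) 1).foldl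
      (fun acc i => acc ++ [String.ofList (PySem.List.pyRepeat [' '] i ++ ['X'] ++
          PySem.List.pyRepeat [' '] (n - 2*i - 2) ++ ['X'] ++ PySem.List.pyRepeat [' '] i)]) [])
    = (PySem.List.pyRange 0 (PySem.Int.truncdiv n 2) 1).map
        (fun i => String.ofList (PySem.List.pyRepeat [' '] i ++ ['X'] ++
          PySem.List.pyRepeat [' '] (n - 2*i - 2) ++ ['X'] ++ PySem.List.pyRepeat [' '] i)) := by
  rw [PySem.List.foldl_append_singleton_eq_map]
  simp

-- A's reversed index loop appends subresult reversed
theorem rev_loop (sub res : List String) :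
    (PySem.List.pyRange ((sub.length : Int) - 1) (-1) (-1)).foldl
      (fun acc j => acc ++ [PySem.List.pyGetD sub j ""]) res = res ++ sub.reverse := by
  rw [PySem.List.pyRange_neg_one_eq_reverse]
  have : (-1 : Int) + 1 = 0 := by norm_num
  rw [this]
  have : ((sub.length : Int) - 1) + 1 = (sub.length : Int) := by ring
  rw [this]
  rw [PySem.List.foldl_append_singleton_eq_map, List.map_reverse,
      PySem.List.map_pyGetD_pyRange_zero']

theorem printX_eq_of_two_le (n : Int) (h2 : 2 ≤ n) :
    printX n = printX_alt n := by
  have hn1 : ¬ (n = 1) := by omega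
  have hk0 : 0 ≤ n / 2 := by omega
  have hkn : n / 2 ≤ n - n / 2 := by omega
  have hnk : n - n / 2 ≤ n := by omega
  -- B, split into first half, middle, second half
  have hBsplit : PySem.List.pyRange 0 n 1 =
      PySem.List.pyRange 0 (n/2) 1 ++ PySem.List.pyRange (n/2) (n - n/2) 1 ++
      PySem.List.pyRange (n - n/2) n 1 := by
    rw [PySem.List.pyRange_one_append 0 (n/2) n hk0 (by omega),
        PySem.List.pyRange_one_append (n/2) (n - n/2) n hkn hnk]
    simp [List.append_assoc]
  have hsecond : (PySem.List.pyRange (n - n/2) n 1).map (fun i => String.ofList (bRow n i))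
      = ((PySem.List.pyRange 0 (n/2) 1).map (fun i => String.ofList (bRow n i))).reverse := by
    rw [second_half n (n/2), List.map_reverse, List.map_map]
    congr 1
    apply List.map_congr_left
    intro i _
    simp only [Function.comp]
    rw [bRow_symm]
  -- A, in closed form
  unfold printX
  rw [if_neg hn1]
  simp only []
  rw [sub_eq, rev_loop, tdiv_two n (by omega)]
  -- identify A's half rows with B's rows
  have hrows : (PySem.List.pyRange 0 (n/2) 1).map
      (fun i => String.ofList (PySem.List.pyRepeat [' '] i ++ ['X'] ++
        PySem.List.pyRepeat [' '] (n - 2*i - 2) ++ ['X'] ++ PySem.List.pyRepeat [' '] i))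
      = (PySem.List.pyRange 0 (n/2) 1).map (fun i => String.ofList (bRow n i)) := by
    apply List.map_congr_left
    intro i hi
    rw [PySem.List.mem_pyRange_one] at hi
    congr 1
    rw [row_eq_of_lt n i hi.1 (by omega), PySem.List.pyRepeat_singleton,
        PySem.List.pyRepeat_singleton]
  rw [hrows]
  have hBrows : (PySem.List.pyRange 0 n 1).map (fun i => String.ofList (bRowImp n i))
      = (PySem.List.pyRange 0 n 1).map (fun i => String.ofList (bRow n i)) := by
    apply List.map_congr_left
    intro i hi
    rw [PySem.List.mem_pyRange_one] at hi
    rw [rowImp_eq n i hi.1 hi.2]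
  rw [alt_eq, hBrows, hBsplit]
  simp only [List.map_append]
  rw [hsecond, mod_two]
  rcases Int.emod_two_eq_zero_or_one n with he | ho
  · -- even: no middle chunk
    rw [if_neg (by omega)]
    have : n - n/2 = n/2 := by omega
    rw [this, show PySem.List.pyRange (n/2) (n/2) 1 = [] from
      PySem.List.pyRange_one_eq_nil le_rfl]
    simp
  · -- odd: the middle chunk is exactly the centre row
    rw [if_pos (by omega)]
    have : n - n/2 = n/2 + 1 := by omega
    rw [this, PySem.List.pyRange_one_singleton]
    have hctr : String.ofList (PySem.List.pyRepeat [' '] (PySem.Int.truncdiv (n-1) 2) ++ ['X'] ++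
        PySem.List.pyRepeat [' '] (PySem.Int.truncdiv (n-1) 2)) = String.ofList (bRow n (n/2)) := by
      congr 1
      rw [tdiv_two (n-1) (by omega)]
      have : (n-1)/2 = n/2 := by omega
      rw [this, row_center n (by omega) ho, PySem.List.pyRepeat_singleton]
    simp only [List.map_cons, List.map_nil]
    rw [hctr]

theorem printX_eq_of_nonpos_even (n : Int) (hle : n ≤ 0) (he : n % 2 = 0) :
    printX n = printX_alt n := by
  unfold printX printX_alt
  rw [if_neg (by omega)]
  simp only []
  rw [PySem.List.pyRange_one_eq_nil (tdiv_two_nonpos n hle), mod_two]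
  rw [if_neg (by omega)]
  simp only [List.foldl_nil, List.length_nil, Int.ofNat_zero]
  rw [PySem.List.pyRange_neg_one_eq_reverse, PySem.List.pyRange_one_eq_nil (by norm_num),
      PySem.List.pyRange_one_eq_nil hle]
  simp

theorem printX_neg_odd (n : Int) (hlt : n < 0) (ho : n % 2 = 1) :
    printX n = ["X"] := by
  unfold printX
  rw [if_neg (by omega)]
  simp only []
  rw [PySem.List.pyRange_one_eq_nil (tdiv_two_nonpos n (by omega)), mod_two]
  rw [if_pos (by omega)]
  simp only [List.foldl_nil, List.length_nil, Int.ofNat_zero]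
  rw [PySem.List.pyRange_neg_one_eq_reverse, PySem.List.pyRange_one_eq_nil (by norm_num)]
  have h1 : PySem.List.pyRepeat [' '] (PySem.Int.truncdiv (n-1) 2) = [] := by
    rw [PySem.List.pyRepeat_singleton]
    have := tdiv_two_nonpos (n-1) (by omega)
    have : (PySem.Int.truncdiv (n-1) 2).toNat = 0 := by omega
    rw [this, List.replicate_zero]
  rw [h1]
  simp

-- ===== VERDICT (by name: the statement is the Claim_ definition above) =====
theorem printX_spec : Claim_unchanged_printX := by
  intro n _ hD
  rcases lt_trichotomy n 0 with hlt | rfl | hpos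
  · rcases Int.emod_two_eq_zero_or_one n with he | ho
    · exact printX_eq_of_nonpos_even n (by omega) he
    · exact absurd (⟨hlt, ho⟩ : D_printX n) hD
  · exact printX_eq_of_nonpos_even 0 (by omega) (by norm_num)
  · rcases eq_or_lt_of_le (by omega : (1:Int) ≤ n) with h1 | h2
    · rw [← h1]; decide
    · exact printX_eq_of_two_le n (by omega)

theorem printX_changed : Claim_changed_printX := by unfold Claim_changed_printX; decide

theorem printX_tight : Claim_exact_printX := by
  intro n _ hD
  rw [printX_neg_odd n hD.1 hD.2]
  unfold printX_alt
  rw [PySem.List.pyRange_one_eq_nil (le_of_lt hD.1)]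
  simp
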